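-- pv_equiv track=rewrite | github.com/daniel-reich/turbo-robot | HzeTvQqnH2afZs6GY_9.py | generate_rug
-- ===== SOURCE A (Python) =====
-- def generate_rug(n, direction):
--     if n == 1:
--         return [[0]]
--     rug = []
--     n2 = n // 2
--     if direction == "left":
--         rug = [list(range(n))]
--         for r in range(1, n2):
--             row = [0] * n
--             start = r
--             idx = start + 1
--             k = 1
--             while idx < n:
--                 row[idx] = k
--                 k += 1
--                 idx += 1
--             idx = start - 1
--             k = 1
--             while idx >= 0:
--                 row[idx] = k
--                 k += 1
--                 idx -= 1
--             rug.append(row)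
--         if n % 2 == 1:
--             row = [0] * n
--             for k in range(1, n2 + 1):
--                 row[n2 - k] = k
--                 row[n2 + k] = k
--             rug.append(row)
--             rug2 = rug[:-1]
--             rug = rug + [row[::-1] for row in rug2[::-1]]
--         else:
--             rug = rug + [row[::-1] for row in rug[::-1]]
--     else:
--         rug = [list(range(n))[::-1]]
--         for r in range(1, n2):
--             row = [0] * n
--             start = n - r - 1
--             idx = start + 1
--             k = 1
--             while idx < n:
--                 row[idx] = k
--                 k += 1
--                 idx += 1
--             idx = start - 1
--             k = 1
--             while idx >= 0:
--                 row[idx] = k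
--                 k += 1
--                 idx -= 1
--             rug.append(row)
--         if n % 2 == 1:
--             row = [0] * n
--             for k in range(1, n2 + 1):
--                 row[n2 - k] = k
--                 row[n2 + k] = k
--             rug.append(row)
--             rug2 = rug[:-1]
--             rug = rug + [row[::-1] for row in rug2[::-1]]
--         else:
--             rug = rug + [row[::-1] for row in rug[::-1]]
--     return rug
-- ===== SOURCE B (Python) =====
-- def generate_rug(n, direction):
--     if direction == "left":
--         return [[abs(i - j) for j in range(n)] for i in range(n)]
--     return [[abs(i + j - (n - 1)) for j in range(n)] for i in range(n)]
-- ===== Notes on version B (the rewrite author's own statement) =====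
-- stated objective: simpler
-- what changed: B computes every cell directly from the closed-form diagonal distance (abs(i-j) or abs(i+j-(n-1))) instead of A's row-walking with two while loops, a special middle row and a reverse-and-mirror pass; Pre_ restricts to the task's natural domain n >= 1, where for n <= 0 A returns a list of empty rows and B the empty grid, neither being specified.
-- outside the precondition, e.g. on generate_rug(0, 'left'): A returns [[], []], B returns []; on generate_rug(-1, 'right'): A returns [[], [], []], B returns []
import Mathlib
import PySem

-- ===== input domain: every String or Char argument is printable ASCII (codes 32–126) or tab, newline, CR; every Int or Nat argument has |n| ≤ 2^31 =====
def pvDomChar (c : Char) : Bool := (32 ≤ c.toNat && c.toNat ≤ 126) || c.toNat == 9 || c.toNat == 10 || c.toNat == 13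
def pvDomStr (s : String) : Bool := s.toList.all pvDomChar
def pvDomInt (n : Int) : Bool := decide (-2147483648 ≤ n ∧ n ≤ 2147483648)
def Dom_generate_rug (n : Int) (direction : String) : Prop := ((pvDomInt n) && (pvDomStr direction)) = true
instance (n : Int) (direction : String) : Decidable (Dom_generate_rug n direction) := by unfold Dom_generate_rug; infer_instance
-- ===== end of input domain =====

-- B replaces A's row-walking (two while loops per row, a special middle row and a
-- reverse-and-mirror pass) with the closed-form diagonal distance per cell; same O(n^2) cost.

-- ===== PORT A =====
-- 'while idx < n: row[idx] = k; k += 1; idx += 1'.  On every executed iteration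
-- 0 ≤ idx < n = len(row), so 'row[idx] = k' is exactly 'row.set idx.toNat k'.
def pvFillUpGo (n : Int) : Nat → List Int → Int → Int → List Int
  | 0, row, _, _ => row
  | fuel + 1, row, idx, k => pvFillUpGo n fuel (row.set idx.toNat k) (idx + 1) (k + 1)

def pvFillUp (n : Int) (row : List Int) (idx k : Int) : List Int :=
  pvFillUpGo n (n - idx).toNat row idx k

-- 'while idx >= 0: row[idx] = k; k += 1; idx -= 1'; executed indices are in range likewise.
def pvFillDownGo : Nat → List Int → Int → Int → List Int
  | 0, row, _, _ => row
  | fuel + 1, row, idx, k => pvFillDownGo fuel (row.set idx.toNat k) (idx - 1) (k + 1)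

def pvFillDown (row : List Int) (idx k : Int) : List Int :=
  pvFillDownGo (idx + 1).toNat row idx k

-- 'row = [0] * n' ([] for n ≤ 0, hence replicate n.toNat) then the two while loops.
def pvBuildRow (n start : Int) : List Int :=
  pvFillDown (pvFillUp n (List.replicate n.toNat 0) (start + 1) 1) (start - 1) 1

-- 'for k in range(1, n2 + 1): row[n2 - k] = k; row[n2 + k] = k' (executed indices in range).
def pvMidRow (n n2 : Int) : List Int :=
  (PySem.List.pyRange 1 (n2 + 1) 1).foldl
    (fun row k => (row.set (n2 - k).toNat k).set (n2 + k).toNat k)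
    (List.replicate n.toNat 0)

-- rug[:-1] is dropLast; row[::-1] is List.reverse (both exact).
def generate_rug (n : Int) (direction : String) : List (List Int) :=
  if n == 1 then [[0]]
  else
    let n2 := PySem.Int.floordiv n 2
    if direction == "left" then
      let rug := (PySem.List.pyRange 1 n2 1).foldl
        (fun rug r => rug ++ [pvBuildRow n r]) [PySem.List.pyRange 0 n 1]
      if PySem.Int.mod n 2 == 1 then
        let rug := rug ++ [pvMidRow n n2]
        let rug2 := rug.dropLast
        rug ++ (rug2.reverse.map List.reverse)
      else
        rug ++ (rug.reverse.map List.reverse)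
    else
      let rug := (PySem.List.pyRange 1 n2 1).foldl
        (fun rug r => rug ++ [pvBuildRow n (n - r - 1)]) [(PySem.List.pyRange 0 n 1).reverse]
      if PySem.Int.mod n 2 == 1 then
        let rug := rug ++ [pvMidRow n n2]
        let rug2 := rug.dropLast
        rug ++ (rug2.reverse.map List.reverse)
      else
        rug ++ (rug.reverse.map List.reverse)

-- ===== PORT B =====
def generate_rug_alt (n : Int) (direction : String) : List (List Int) :=
  if direction == "left" then
    (PySem.List.pyRange 0 n 1).map (fun i =>
      (PySem.List.pyRange 0 n 1).map (fun j => |i - j|))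
  else
    (PySem.List.pyRange 0 n 1).map (fun i =>
      (PySem.List.pyRange 0 n 1).map (fun j => |i + j - (n - 1)|))

-- ===== PRECONDITION & SPEC =====
-- Pre_ restricts to the task's natural domain, a rug with n ≥ 1 rows: for a
-- non-positive row count (outside Pre_, excluded examples below) A returns a list of
-- two or three empty rows and B returns the empty grid; neither value is specified.
def Pre_generate_rug (n : Int) (direction : String) : Prop := 1 ≤ n
instance (n : Int) (direction : String) : Decidable (Pre_generate_rug n direction) := by
  unfold Pre_generate_rug; infer_instance

def pvWitness_generate_rug : Int × String := (3, "left")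

def Spec_generate_rug (n : Int) (direction : String) (out : List (List Int)) : Prop :=
  out = generate_rug_alt n direction
instance (n : Int) (direction : String) (out : List (List Int)) : Decidable (Spec_generate_rug n direction out) := by
  unfold Spec_generate_rug; infer_instance

-- ===== CLAIM (what is proved, stated in full; the proofs are below) =====
def Claim_equal_generate_rug : Prop := ∀ (n : Int) (direction : String), Dom_generate_rug n direction → Pre_generate_rug n direction → Spec_generate_rug n direction (generate_rug n direction)

-- ===== LEMMAS AND PROOFS =====

-- the closed-form row: [|s - j| for j in range(n)]
def pvRowF (n s : Int) : List Int :=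
  (PySem.List.pyRange 0 n 1).map (fun j => |s - j|)

lemma pvFillUpGo_length (n : Int) (fuel : Nat) (row : List Int) (idx k : Int) :
    (pvFillUpGo n fuel row idx k).length = row.length := by
  induction fuel generalizing row idx k with
  | zero => rfl
  | succ fuel ih => rw [pvFillUpGo, ih]; simp

lemma pvFillUp_length (n : Int) (row : List Int) (idx k : Int) :
    (pvFillUp n row idx k).length = row.length := pvFillUpGo_length ..

lemma pvFillDownGo_length (fuel : Nat) (row : List Int) (idx k : Int) :
    (pvFillDownGo fuel row idx k).length = row.length := by
  induction fuel generalizing row idx k with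
  | zero => rfl
  | succ fuel ih => rw [pvFillDownGo, ih]; simp

lemma pvFillDown_length (row : List Int) (idx k : Int) :
    (pvFillDown row idx k).length = row.length := pvFillDownGo_length ..

lemma pvFillUp_getElem? (n : Int) (row : List Int) (idx k : Int)
    (hidx : 0 ≤ idx) (hlen : (row.length : Int) = n) (j : Nat) (hj : j < row.length) :
    (pvFillUp n row idx k)[j]? =
      if idx ≤ (j : Int) ∧ (j : Int) < n then some (k + ((j : Int) - idx)) else row[j]? := by
  rw [pvFillUp]
  generalize hf : (n - idx).toNat = fuel
  induction fuel generalizing row idx k with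
  | succ fuel ih =>
    have h : idx < n := by omega
    rw [pvFillUpGo, ih (row.set idx.toNat k) (idx + 1) (k + 1) (by omega)
        (by simpa using hlen) (by simpa using hj) (by omega)]
    rw [List.getElem?_set]
    by_cases hji : (j : Int) = idx
    · have h1 : idx.toNat = j := by omega
      have h2 : ¬ (idx + 1 ≤ (j : Int)) := by omega
      simp [h1, hj, hji]
      omega
    · have h1 : ¬ (idx.toNat = j) := by omega
      by_cases hc : idx + 1 ≤ (j : Int) ∧ (j : Int) < n
      · have hc' : idx ≤ (j : Int) ∧ (j : Int) < n := ⟨by omega, hc.2⟩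
        simp [hc, hc']
        omega
      · have hc' : ¬ (idx ≤ (j : Int) ∧ (j : Int) < n) := by omega
        simp only [h1, if_false, if_neg hc, if_neg hc']
  | zero =>
    have hcond : ¬ (idx ≤ (j : Int) ∧ (j : Int) < n) := by omega
    rw [pvFillUpGo, if_neg hcond]

lemma pvFillDown_getElem? (row : List Int) (idx k : Int)
    (hidx : idx < (row.length : Int)) (j : Nat) (hj : j < row.length) :
    (pvFillDown row idx k)[j]? =
      if (j : Int) ≤ idx then some (k + (idx - (j : Int))) else row[j]? := by
  rw [pvFillDown]
  generalize hf : (idx + 1).toNat = fuel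
  induction fuel generalizing row idx k with
  | succ fuel ih =>
    have h : 0 ≤ idx := by omega
    rw [pvFillDownGo, ih (row.set idx.toNat k) (idx - 1) (k + 1)
        (by simp; omega) (by simpa using hj) (by omega)]
    rw [List.getElem?_set]
    by_cases hji : (j : Int) = idx
    · have h1 : idx.toNat = j := by omega
      have h2 : ¬ ((j : Int) ≤ idx - 1) := by omega
      simp [h1, hj, hji]
    · have h1 : ¬ (idx.toNat = j) := by omega
      by_cases hc : (j : Int) ≤ idx - 1
      · have hc' : (j : Int) ≤ idx := by omega
        simp [hc, hc']
        omega
      · have hc' : ¬ ((j : Int) ≤ idx) := by omega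
        simp only [h1, if_false, if_neg hc, if_neg hc']
  | zero =>
    have hcond : ¬ ((j : Int) ≤ idx) := by omega
    rw [pvFillDownGo, if_neg hcond]

lemma pvBuildRow_eq_rowF (n s : Int) (h0 : 0 ≤ s) (hs : s < n) :
    pvBuildRow n s = pvRowF n s := by
  apply List.ext_getElem?
  intro j
  by_cases hj : j < n.toNat
  · have hlenU : (pvFillUp n (List.replicate n.toNat 0) (s + 1) 1).length = n.toNat := by
      simp [pvFillUp_length]
    rw [pvBuildRow, pvFillDown_getElem? _ _ _ (by rw [hlenU]; omega) j (by omega),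
        pvFillUp_getElem? _ _ _ _ (by omega) (by simp; omega) j (by simp; omega)]
    have hrow : (pvRowF n s)[j]? = some |s - (j : Int)| := by
      simp [pvRowF, List.getElem?_map, PySem.List.getElem?_pyRange_one]
      omega
    rw [hrow]
    by_cases h1 : (j : Int) ≤ s - 1
    · have : |s - (j : Int)| = 1 + (s - 1 - (j : Int)) := by
        rw [abs_of_nonneg (by omega)]; omega
      simp [h1, this]
    · by_cases h2 : s + 1 ≤ (j : Int) ∧ (j : Int) < n
      · have : |s - (j : Int)| = 1 + ((j : Int) - (s + 1)) := by
          rw [abs_of_nonpos (by omega)]; omega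
        simp [h1, h2, this]
      · have hjs : (j : Int) = s := by omega
        rw [if_neg h1, if_neg h2, List.getElem?_replicate, if_pos hj, hjs]
        simp
  · have h1 : (pvBuildRow n s).length ≤ j := by
      simp [pvBuildRow, pvFillDown_length, pvFillUp_length]; omega
    have h2 : (pvRowF n s).length ≤ j := by
      simp [pvRowF, PySem.List.length_pyRange_one]; omega
    rw [List.getElem?_eq_none h1, List.getElem?_eq_none h2]

lemma pvMidFold_length (n2 : Int) (xs : List Int) (L : List Int) :
    (xs.foldl (fun row k => (row.set (n2 - k).toNat k).set (n2 + k).toNat k) L).length = L.length := by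
  induction xs generalizing L with
  | nil => rfl
  | cons a t iht => simp only [List.foldl_cons]; rw [iht]; simp

lemma pvMidRow_getElem?_aux (n2 : Int) (m : Nat) (hm : (m : Int) ≤ n2)
    (n : Nat) (hn : (n : Int) = 2 * n2 + 1) (j : Nat) (hj : j < n) :
    ((PySem.List.pyRange 1 ((m : Int) + 1) 1).foldl
      (fun row k => (row.set (n2 - k).toNat k).set (n2 + k).toNat k)
      (List.replicate n 0))[j]? =
      some (if (j : Int) < n2 - m ∨ n2 + m < (j : Int) then 0 else |n2 - (j : Int)|) := by
  induction m with
  | zero =>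
    rw [show ((0:Nat):Int) + 1 = 1 by norm_num, PySem.List.pyRange_one_eq_nil (by omega)]
    simp only [List.foldl_nil, List.getElem?_replicate, hj, if_true]
    by_cases hc : (j : Int) < n2 - (0:Nat) ∨ n2 + (0:Nat) < (j : Int)
    · rw [if_pos hc]
    · rw [if_neg hc, show n2 - (j:Int) = 0 by push_cast at hc; omega, abs_zero]
  | succ m ih =>
    rw [show (((m+1 : Nat)) : Int) + 1 = ((m : Int) + 1) + 1 by push_cast; ring,
        PySem.List.pyRange_one_succ_right (by omega), List.foldl_append]
    simp only [List.foldl_cons, List.foldl_nil]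
    rw [List.getElem?_set, List.getElem?_set]
    have hflen0 : ((PySem.List.pyRange 1 ((m : Int) + 1) 1).foldl
        (fun row k => (row.set (n2 - k).toNat k).set (n2 + k).toNat k)
        (List.replicate n (0:Int))).length = n := by
      rw [pvMidFold_length]; simp
    simp only [List.length_set, hflen0]
    by_cases hA : (n2 + ((m : Int) + 1)).toNat = j
    · have hj2 : (j : Int) = n2 + (m + 1) := by omega
      simp only [hA, if_true]
      rw [if_pos (by omega)]
      have : ¬ ((j : Int) < n2 - ((m+1 : Nat) : Int) ∨ n2 + ((m+1 : Nat) : Int) < (j : Int)) := by push_cast; omega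
      rw [if_neg this, abs_of_nonpos (by omega)]
      congr 1; omega
    · rw [if_neg hA]
      by_cases hB : (n2 - ((m : Int) + 1)).toNat = j
      · have hj2 : (j : Int) = n2 - (m + 1) := by omega
        simp only [hB, if_true]
        rw [if_pos (by omega)]
        have : ¬ ((j : Int) < n2 - ((m+1 : Nat) : Int) ∨ n2 + ((m+1 : Nat) : Int) < (j : Int)) := by push_cast; omega
        rw [if_neg this, abs_of_nonneg (by omega)]
        congr 1; omega
      · rw [if_neg hB, ih (by omega)]
        congr 1
        by_cases hc : (j : Int) < n2 - m ∨ n2 + m < (j : Int)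
        · by_cases hc' : (j : Int) < n2 - ((m+1:Nat) : Int) ∨ n2 + ((m+1:Nat) : Int) < (j : Int)
          · rw [if_pos hc, if_pos hc']
          · exfalso; push_cast at hc'; omega
        · rw [if_neg hc, if_neg (by push_cast; omega)]

lemma pvMidRow_eq_rowF (n n2 : Int) (hn2 : 0 ≤ n2) (hn : n = 2 * n2 + 1) :
    pvMidRow n n2 = pvRowF n n2 := by
  apply List.ext_getElem?
  intro j
  by_cases hj : j < n.toNat
  · rw [pvMidRow, show n2 + 1 = ((n2.toNat : Nat) : Int) + 1 by omega,
        pvMidRow_getElem?_aux n2 n2.toNat (by omega) n.toNat (by omega) j hj]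
    have hrow : (pvRowF n n2)[j]? = some |n2 - (j : Int)| := by
      simp [pvRowF, List.getElem?_map, PySem.List.getElem?_pyRange_one]
      omega
    rw [hrow, if_neg (by omega)]
  · rw [List.getElem?_eq_none (by rw [pvMidRow, pvMidFold_length]; simp; omega),
        List.getElem?_eq_none (by simp [pvRowF, PySem.List.length_pyRange_one]; omega)]

lemma pvRowF_reverse (n s : Int) :
    (pvRowF n s).reverse = pvRowF n (n - 1 - s) := by
  apply List.ext_getElem
  · simp [pvRowF]
  · intro j h1 h2
    simp only [pvRowF, List.getElem_reverse, List.getElem_map, List.length_map,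
      PySem.List.getElem_pyRange_one, PySem.List.length_pyRange_one]
    simp only [pvRowF, List.length_reverse, List.length_map, PySem.List.length_pyRange_one] at h1
    rw [show (0:Int) + (((n - 0).toNat - 1 - j : Nat) : Int) = n - 1 - (j:Int) by omega]
    rw [show s - (n - 1 - (j:Int)) = -((n - 1 - s) - (0 + (j:Int))) by ring, abs_neg]

-- the mirror pass: reversing the stack of the first a rows and each row gives rows n-a .. n-1
lemma pvMirror (f : Int → List Int) (n a : Int) (h0 : 0 ≤ a)
    (hrev : ∀ s, 0 ≤ s → s < a → (f s).reverse = f (n - 1 - s)) :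
    ((PySem.List.pyRange 0 a 1).map f).reverse.map List.reverse
      = (PySem.List.pyRange (n - a) n 1).map f := by
  apply List.ext_getElem
  · simp [PySem.List.length_pyRange_one]
  · intro j h1 h2
    simp only [List.length_map, List.length_reverse, PySem.List.length_pyRange_one] at h1
    simp only [List.getElem_map, List.getElem_reverse, List.length_map,
      PySem.List.length_pyRange_one, PySem.List.getElem_pyRange_one]
    rw [hrev _ (by omega) (by omega)]
    congr 1
    omega

-- rows 0..c-1 computed directly (c = n2 or n2+1), mirror supplies rows n-a..n-1, c = n-a
lemma pvAssemble (f : Int → List Int) (n a c : Int) (h0 : 0 ≤ a) (hc0 : 0 ≤ c)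
    (hca : n - a = c) (hcn : c ≤ n)
    (hrev : ∀ s, 0 ≤ s → s < a → (f s).reverse = f (n - 1 - s)) :
    (PySem.List.pyRange 0 c 1).map f ++ ((PySem.List.pyRange 0 a 1).map f).reverse.map List.reverse
      = (PySem.List.pyRange 0 n 1).map f := by
  rw [pvMirror f n a h0 hrev, hca, ← List.map_append,
      ← PySem.List.pyRange_one_append 0 c n hc0 hcn]

lemma pvRug_foldl (g : Int → List Int) (b : Int) (init : List Int) :
    (PySem.List.pyRange 1 b 1).foldl (fun rug r => rug ++ [g r]) [init]
      = init :: (PySem.List.pyRange 1 b 1).map g := by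
  rw [PySem.List.foldl_append_singleton_eq_map]
  rfl

lemma pvFirstRow_left (n : Int) : PySem.List.pyRange 0 n 1 = pvRowF n 0 := by
  rw [pvRowF, List.map_congr_left (g := id) ?_, List.map_id]
  intro x hx
  rw [PySem.List.mem_pyRange_one] at hx
  simp only [id, zero_sub, abs_neg, abs_of_nonneg hx.1]

lemma pvFirstRow_right (n : Int) :
    (PySem.List.pyRange 0 n 1).reverse = pvRowF n (n - 1) := by
  rw [pvFirstRow_left, pvRowF_reverse n 0]
  norm_num

-- the computed half of the grid, left direction
lemma pvFold_left (n n2 : Int) (hn2 : 0 < n2) (hn2n : n2 < n) :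
    (PySem.List.pyRange 1 n2 1).foldl (fun rug r => rug ++ [pvBuildRow n r]) [PySem.List.pyRange 0 n 1]
      = (PySem.List.pyRange 0 n2 1).map (pvRowF n) := by
  rw [pvRug_foldl, pvFirstRow_left, PySem.List.pyRange_one_cons hn2, List.map_cons]
  congr 1
  apply List.map_congr_left
  intro r hr
  rw [PySem.List.mem_pyRange_one] at hr
  exact pvBuildRow_eq_rowF n r (by omega) (by omega)

-- the computed half of the grid, right direction; its row r is pvRowF n (n-1-r)
lemma pvFold_right (n n2 : Int) (hn2 : 0 < n2) (hn2n : n2 < n) :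
    (PySem.List.pyRange 1 n2 1).foldl (fun rug r => rug ++ [pvBuildRow n (n - r - 1)])
        [(PySem.List.pyRange 0 n 1).reverse]
      = (PySem.List.pyRange 0 n2 1).map (fun r => pvRowF n (n - 1 - r)) := by
  rw [pvRug_foldl, pvFirstRow_right, PySem.List.pyRange_one_cons hn2, List.map_cons]
  congr 1
  · congr 1; ring
  · apply List.map_congr_left
    intro r hr
    rw [PySem.List.mem_pyRange_one] at hr
    rw [pvBuildRow_eq_rowF n (n - r - 1) (by omega) (by omega)]
    congr 1; ring

lemma pvAlt_left (n : Int) :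
    generate_rug_alt n "left" = (PySem.List.pyRange 0 n 1).map (pvRowF n) := by
  rw [generate_rug_alt, if_pos (by decide)]
  rfl

lemma pvAlt_right (n : Int) (d : String) (hd : ¬ (d == "left") = true) :
    generate_rug_alt n d = (PySem.List.pyRange 0 n 1).map (fun i => pvRowF n (n - 1 - i)) := by
  rw [generate_rug_alt, if_neg hd]
  apply List.map_congr_left
  intro i _
  apply List.map_congr_left
  intro j _
  rw [show i + j - (n - 1) = -((n - 1 - i) - j) by ring, abs_neg]

lemma pvRowG_rev (n : Int) : ∀ s : Int,
    ((fun r => pvRowF n (n - 1 - r)) s).reverse = (fun r => pvRowF n (n - 1 - r)) (n - 1 - s) := by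
  intro s
  simp only [pvRowF_reverse]

-- ===== VERDICT (by name: the statement is the Claim_ definition above) =====
theorem generate_rug_spec : Claim_equal_generate_rug := by
  intro n d _ hD
  rw [Pre_generate_rug] at hD
  rw [Spec_generate_rug]
  by_cases hn1 : n = 1
  · subst hn1
    rw [generate_rug, if_pos (by decide), generate_rug_alt]
    by_cases hd : (d == "left") = true
    · rw [if_pos hd]; decide
    · rw [if_neg hd]; decide
  · have hn : 2 ≤ n := by omega
    have hfd : PySem.Int.floordiv n 2 = n / 2 := PySem.Int.floordiv_eq_ediv_of_pos (by omega)
    have hmd : PySem.Int.mod n 2 = n % 2 := PySem.Int.mod_eq_emod_of_pos (by omega)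
    rw [generate_rug, if_neg (by simp [hn1])]
    simp only [hfd, hmd]
    have h20 : 0 < n / 2 := by omega
    have h2n : n / 2 < n := by omega
    have hA0 : (0:Int) ≤ n / 2 := by omega
    have hA1 : (0:Int) ≤ n / 2 + 1 := by omega
    have hAn : n / 2 ≤ n := by omega
    have hAn1 : n / 2 + 1 ≤ n := by omega
    by_cases hd : (d == "left") = true
    · rw [if_pos hd, show d = "left" from by simpa using hd, pvAlt_left, pvFold_left n (n/2) h20 h2n]
      by_cases ho : (n % 2 == 1) = true
      · have hodd : n = 2 * (n / 2) + 1 := by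
          have ho' : n % 2 = 1 := by simpa using ho
          omega
        rw [if_pos ho, pvMidRow_eq_rowF n (n/2) hA0 hodd, List.dropLast_concat,
            show (PySem.List.pyRange 0 (n/2) 1).map (pvRowF n) ++ [pvRowF n (n/2)]
              = (PySem.List.pyRange 0 (n/2 + 1) 1).map (pvRowF n) by
              rw [PySem.List.pyRange_one_succ_right (by omega), List.map_append]; rfl]
        exact pvAssemble (pvRowF n) n (n/2) (n/2 + 1) hA0 hA1 (by omega) hAn1
          (fun s _ _ => pvRowF_reverse n s)
      · have ho' : ¬ n % 2 = 1 := by simpa using ho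
        rw [if_neg ho]
        exact pvAssemble (pvRowF n) n (n/2) (n/2) hA0 hA0 (by omega) hAn
          (fun s _ _ => pvRowF_reverse n s)
    · rw [if_neg hd, pvAlt_right n d hd, pvFold_right n (n/2) h20 h2n]
      by_cases ho : (n % 2 == 1) = true
      · have hodd : n = 2 * (n / 2) + 1 := by
          have ho' : n % 2 = 1 := by simpa using ho
          omega
        rw [if_pos ho, pvMidRow_eq_rowF n (n/2) hA0 hodd,
            show pvRowF n (n/2) = (fun r => pvRowF n (n - 1 - r)) (n/2) by
              simp only []; congr 1; omega,
            List.dropLast_concat,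
            show (PySem.List.pyRange 0 (n/2) 1).map (fun r => pvRowF n (n - 1 - r))
                ++ [(fun r => pvRowF n (n - 1 - r)) (n/2)]
              = (PySem.List.pyRange 0 (n/2 + 1) 1).map (fun r => pvRowF n (n - 1 - r)) by
              rw [PySem.List.pyRange_one_succ_right (by omega), List.map_append]; rfl]
        exact pvAssemble (fun r => pvRowF n (n - 1 - r)) n (n/2) (n/2 + 1) hA0 hA1
          (by omega) hAn1 (fun s _ _ => pvRowG_rev n s)
      · have ho' : ¬ n % 2 = 1 := by simpa using ho
        rw [if_neg ho]
        exact pvAssemble (fun r => pvRowF n (n - 1 - r)) n (n/2) (n/2) hA0 hA0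
          (by omega) hAn (fun s _ _ => pvRowG_rev n s)
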